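-- pv_equiv track=rewrite | github.com/argeiberq/hack_python_2 | hack_6.py | fn_hack_6
-- ===== SOURCE A (Python) =====
-- def fn_hack_6(input_list):
--     list_salida = []
--     for item, _ in enumerate(input_list, 1):
--         if item % 2 == 1:
--             list_salida.append(str(item))
--         else:
--             list_salida.append("-")
--     if not input_list:
--         list_salida.append("0")
--     return list_salida
-- ===== SOURCE B (Python) =====
-- def fn_hack_6(input_list):
--     n = len(input_list)
--     list_salida = ["-"] * n
--     for i in range(1, n + 1, 2):
--         list_salida[i - 1] = str(i)
--     if not input_list:
--         list_salida.append("0")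
--     return list_salida
-- ===== Notes on version B (the rewrite author's own statement) =====
-- stated objective: alternative
-- what changed: Instead of a branch-per-element pass over enumerate, B preallocates a list of n dashes and overwrites only the odd 1-based positions with a strided range(1, n+1, 2) loop.
import Mathlib
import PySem

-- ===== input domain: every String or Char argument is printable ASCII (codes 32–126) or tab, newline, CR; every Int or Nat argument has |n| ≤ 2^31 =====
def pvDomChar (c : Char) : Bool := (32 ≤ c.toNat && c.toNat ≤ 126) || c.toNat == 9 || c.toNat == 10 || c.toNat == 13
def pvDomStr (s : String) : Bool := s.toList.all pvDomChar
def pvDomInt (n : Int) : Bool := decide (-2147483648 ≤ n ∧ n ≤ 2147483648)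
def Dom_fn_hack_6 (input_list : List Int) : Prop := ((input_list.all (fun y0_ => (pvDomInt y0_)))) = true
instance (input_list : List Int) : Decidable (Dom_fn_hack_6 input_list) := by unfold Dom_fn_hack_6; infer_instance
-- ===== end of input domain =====

-- B replaces A's branch-per-element pass over enumerate by preallocating n dashes and
-- overwriting only the odd 1-based positions in a strided pass (alternative decomposition, same cost).

-- ===== PORT A =====
def fn_hack_6 (input_list : List Int) : List String :=
  let list_salida : List String := []
  let list_salida := (PySem.List.enumerate input_list 1).foldl
    (fun acc p => if PySem.Int.mod p.1 2 = 1 then acc ++ [PySem.Int.toStr p.1] else acc ++ ["-"])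
    list_salida
  let list_salida := if input_list = [] then list_salida ++ ["0"] else list_salida
  list_salida

-- ===== PORT B =====
def fn_hack_6_alt (input_list : List Int) : List String :=
  let n := input_list.length
  let list_salida : List String := List.replicate n "-"
  -- list_salida[i-1] = str(i); the index i-1 is always in range, where pySetD is exact
  let list_salida := (PySem.List.pyRange 1 ((n : Int) + 1) 2).foldl
    (fun acc i => PySem.List.pySetD acc (i - 1) (PySem.Int.toStr i))
    list_salida
  let list_salida := if input_list = [] then list_salida ++ ["0"] else list_salida
  list_salida

-- ===== PRECONDITION & SPEC =====
def Spec_fn_hack_6 (input_list : List Int) (out : List String) : Prop := out = fn_hack_6_alt input_list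
instance (input_list : List Int) (out : List String) : Decidable (Spec_fn_hack_6 input_list out) := by unfold Spec_fn_hack_6; infer_instance

-- ===== CLAIM (what is proved, stated in full; the proofs are below) =====
def Claim_equal_fn_hack_6 : Prop := ∀ (input_list : List Int), Dom_fn_hack_6 input_list → Spec_fn_hack_6 input_list (fn_hack_6 input_list)

-- ===== LEMMAS AND PROOFS =====

-- the per-position value each program produces at 0-based index k
def pvCell (k : Nat) : String :=
  if PySem.Int.mod (1 + (k : Int)) 2 = 1 then PySem.Int.toStr (1 + (k : Int)) else "-"

-- A's loop, with the branch pushed inside the append, is a map over enumerate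
theorem pvA_core (xs : List Int) :
    (PySem.List.enumerate xs 1).foldl
      (fun acc p => if PySem.Int.mod p.1 2 = 1 then acc ++ [PySem.Int.toStr p.1] else acc ++ ["-"]) []
    = (List.range xs.length).map pvCell := by
  have hstep : (fun (acc : List String) (p : Int × Int) =>
      if PySem.Int.mod p.1 2 = 1 then acc ++ [PySem.Int.toStr p.1] else acc ++ ["-"])
      = fun acc p => acc ++ [if PySem.Int.mod p.1 2 = 1 then PySem.Int.toStr p.1 else "-"] := by
    funext acc p; split <;> rfl
  rw [hstep, PySem.List.foldl_append_singleton_eq_map, List.nil_append]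
  have := PySem.List.map_fst_enumerate xs 1
  calc (PySem.List.enumerate xs 1).map
        (fun p => if PySem.Int.mod p.1 2 = 1 then PySem.Int.toStr p.1 else "-")
      = ((PySem.List.enumerate xs 1).map (·.1)).map
        (fun i => if PySem.Int.mod i 2 = 1 then PySem.Int.toStr i else "-") := by
        rw [List.map_map]; rfl
    _ = (PySem.List.pyRange 1 (1 + xs.length) 1).map
        (fun i => if PySem.Int.mod i 2 = 1 then PySem.Int.toStr i else "-") := by rw [this]
    _ = (List.range xs.length).map pvCell := by
        rw [PySem.List.pyRange_one]
        have h1 : ((1 : Int) + xs.length - 1).toNat = xs.length := by omega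
        rw [h1, List.map_map]
        exact List.map_congr_left (fun k _ => rfl)

-- strided set-fold on l ++ t only touches l when all indices are < l.length
theorem pvSetFold_append (v : Nat → String) (ks : List Nat) (l t : List String)
    (h : ∀ k ∈ ks, 2 * k < l.length) :
    ks.foldl (fun acc k => acc.set (2 * k) (v k)) (l ++ t)
    = (ks.foldl (fun acc k => acc.set (2 * k) (v k)) l) ++ t := by
  induction ks generalizing l with
  | nil => rfl
  | cons k ks ih =>
    simp only [List.foldl_cons]
    rw [List.set_append_left _ _ (h k (by simp))]
    exact ih (l.set (2 * k) (v k)) (fun k' hk' => by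
      rw [List.length_set]; exact h k' (List.mem_cons_of_mem _ hk'))

-- B's strided fill equals the map A produces
theorem pvB_fill (n : Nat) :
    (List.range ((n + 1) / 2)).foldl
      (fun acc k => acc.set (2 * k) (PySem.Int.toStr (1 + 2 * (k : Int))))
      (List.replicate n "-")
    = (List.range n).map pvCell := by
  induction n using Nat.strong_induction_on with
  | _ n ih =>
    match n with
    | 0 => decide
    | 1 => decide
    | (m + 2) =>
      have hsz : (m + 2 + 1) / 2 = (m + 1) / 2 + 1 := by omega
      rw [hsz, List.range_succ, List.foldl_append]
      have hrep : List.replicate (m + 2) "-" = List.replicate m "-" ++ ["-", "-"] :=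
        List.replicate_add m 2 "-"
      rw [hrep, pvSetFold_append _ _ _ _ (fun k hk => by
        simp only [List.mem_range] at hk
        simp only [List.length_replicate]; omega)]
      rw [ih m (by omega)]
      have hlen : ((List.range m).map pvCell).length = m := by simp
      simp only [List.foldl_cons, List.foldl_nil]
      have hm2 : (List.range (m+2)).map pvCell
          = (List.range m).map pvCell ++ [pvCell m, pvCell (m+1)] := by
        rw [show m + 2 = m + 1 + 1 from rfl, List.range_succ, List.range_succ]
        simp
      rcases Nat.even_or_odd m with he | ho
      · obtain ⟨j, hj⟩ := he
        have hk0 : 2 * ((m + 1) / 2) = m := by omega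
        rw [hk0, List.set_append_right _ _ (by omega), hm2, hlen, Nat.sub_self]
        congr 1
        have hm : pvCell m = PySem.Int.toStr (1 + (m : Int)) := by
          unfold pvCell
          rw [if_pos]
          rw [PySem.Int.mod_eq_emod_of_pos (by norm_num)]
          omega
        have hm1 : pvCell (m+1) = "-" := by
          unfold pvCell
          rw [if_neg]
          rw [PySem.Int.mod_eq_emod_of_pos (by norm_num)]
          push_cast; omega
        rw [hm, hm1]
        have harg : (1 : Int) + 2 * (((m + 1) / 2 : Nat) : Int) = 1 + (m : Int) := by omega
        rw [harg]; rfl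
      · obtain ⟨j, hj⟩ := ho
        have hk0 : 2 * ((m + 1) / 2) = m + 1 := by omega
        rw [hk0, List.set_append_right _ _ (by omega), hm2, hlen,
          show m + 1 - m = 1 from by omega]
        congr 1
        have hm : pvCell m = "-" := by
          unfold pvCell
          rw [if_neg]
          rw [PySem.Int.mod_eq_emod_of_pos (by norm_num)]
          omega
        have hm1 : pvCell (m+1) = PySem.Int.toStr (2 + (m : Int)) := by
          unfold pvCell
          rw [if_pos]
          · congr 1; push_cast; ring
          rw [PySem.Int.mod_eq_emod_of_pos (by norm_num)]
          push_cast; omega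
        rw [hm, hm1]
        have harg : (1 : Int) + 2 * (((m + 1) / 2 : Nat) : Int) = 2 + (m : Int) := by omega
        rw [harg]
        rfl

theorem pvB_core (xs : List Int) :
    (PySem.List.pyRange 1 ((xs.length : Int) + 1) 2).foldl
      (fun acc i => PySem.List.pySetD acc (i - 1) (PySem.Int.toStr i))
      (List.replicate xs.length "-")
    = (List.range xs.length).map pvCell := by
  rw [PySem.List.pyRange_of_pos _ _ (by norm_num)]
  have hif : (if (1 : Int) < (xs.length : Int) + 1
      then (((xs.length : Int) + 1 - 1 + 2 - 1) / 2).toNat else 0) = (xs.length + 1) / 2 := by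
    split_ifs <;> omega
  rw [hif, List.foldl_map]
  have hstep : (fun (acc : List String) (k : Nat) =>
      PySem.List.pySetD acc (1 + 2 * (k : Int) - 1) (PySem.Int.toStr (1 + 2 * (k : Int))))
      = fun acc k => acc.set (2 * k) (PySem.Int.toStr (1 + 2 * (k : Int))) := by
    funext acc k
    rw [show (1 : Int) + 2 * (k : Int) - 1 = ((2 * k : Nat) : Int) from by push_cast; ring,
      PySem.List.pySetD_natCast]
  rw [hstep]
  exact pvB_fill xs.length

-- ===== VERDICT (by name: the statement is the Claim_ definition above) =====
theorem fn_hack_6_spec : Claim_equal_fn_hack_6 := by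
  intro xs _
  unfold Spec_fn_hack_6 fn_hack_6 fn_hack_6_alt
  simp only [pvA_core, pvB_core]
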